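-- pv_equiv track=rewrite | github.com/FatalX2080/TNBot | utils/help.py | formatted_output
-- ===== SOURCE A (Python) =====
-- def formatted_output(date: str, data: list) -> str:
--     base = "News at <b>{0}({1})</b>:\n".format(date, len(data))
--     subjects_dict = {}
--
--     for news in sorted(data):
--         subjects_dict.setdefault(news[0], []).append(news[1])
--
--     for key in subjects_dict.keys():
--         information = '  · ' + '\n  · '.join(subjects_dict[key])
--         base += key + '\n' + information + '\n'
--
--     return base
-- ===== SOURCE B (Python) =====
-- def formatted_output(date: str, data: list) -> str:
--     # One pass over the sorted data with a run detector, instead of building a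
--     # dict index and re-scanning it per key.
--     parts = ["News at <b>{0}({1})</b>:\n".format(date, len(data))]
--     prev = None
--     for subject, item in sorted(data):
--         if subject != prev:
--             if prev is not None:
--                 parts.append('\n')
--             parts.append(subject)
--             prev = subject
--         parts.append('\n  \u00b7 ' + item)
--     if prev is not None:
--         parts.append('\n')
--     return ''.join(parts)
-- ===== Notes on version B (the rewrite author's own statement) =====
-- stated objective: alternative
-- what changed: B replaces A's dict-of-lists index (built by setdefault/append over the sorted data, then re-scanned key by key) with a single pass over the sorted data that detects key runs with a previous-subject variable and emits each section as it goes, joining the collected parts once at the end.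
import Mathlib
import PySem

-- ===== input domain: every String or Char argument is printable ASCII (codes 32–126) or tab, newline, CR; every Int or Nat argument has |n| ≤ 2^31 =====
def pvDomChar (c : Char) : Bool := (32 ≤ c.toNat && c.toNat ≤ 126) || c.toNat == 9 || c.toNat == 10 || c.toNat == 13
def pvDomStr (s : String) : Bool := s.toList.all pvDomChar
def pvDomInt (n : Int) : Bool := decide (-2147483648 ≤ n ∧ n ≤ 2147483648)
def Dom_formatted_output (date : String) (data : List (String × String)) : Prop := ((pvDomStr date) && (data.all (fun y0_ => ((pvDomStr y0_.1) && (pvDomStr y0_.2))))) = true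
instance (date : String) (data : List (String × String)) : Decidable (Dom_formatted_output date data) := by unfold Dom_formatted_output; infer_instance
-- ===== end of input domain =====

-- B replaces A's dict-of-lists index with a single run-detecting pass over the
-- sorted data (alternative decomposition, same asymptotic cost).

-- ===== PORT A =====
def formatted_output (date : String) (data : List (String × String)) : String :=
  let base := "News at <b>" ++ date ++ "(" ++ PySem.Int.toStr (PySem.List.len data) ++ ")</b>:\n"
  let subjectsDict :=
    (PySem.List.sorted2 data (fun n => n.1) (fun n => n.2)).foldl
      (fun d news => d.modify news.1 [] (fun l => l ++ [news.2])) PySem.Dict.empty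
  subjectsDict.keys.foldl
    (fun b key =>
      let information := "  · " ++ PySem.Str.join "\n  · " (subjectsDict.getD key [])
      b ++ key ++ "\n" ++ information ++ "\n") base

-- ===== PORT B =====
def formatted_output_alt (date : String) (data : List (String × String)) : String :=
  let parts0 : List String := ["News at <b>" ++ date ++ "(" ++ PySem.Int.toStr (PySem.List.len data) ++ ")</b>:\n"]
  let st :=
    (PySem.List.sorted2 data (fun n => n.1) (fun n => n.2)).foldl
      (fun (st : List String × Option String) p =>
        if some p.1 ≠ st.2 then
          (((if st.2.isSome then st.1 ++ ["\n"] else st.1) ++ [p.1]) ++ ["\n  · " ++ p.2], some p.1)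
        else (st.1 ++ ["\n  · " ++ p.2], st.2))
      (parts0, none)
  PySem.Str.join "" (if st.2.isSome then st.1 ++ ["\n"] else st.1)

-- ===== PRECONDITION & SPEC =====
def Spec_formatted_output (date : String) (data : List (String × String)) (out : String) : Prop := out = formatted_output_alt date data
instance (date : String) (data : List (String × String)) (out : String) : Decidable (Spec_formatted_output date data out) := by unfold Spec_formatted_output; infer_instance

-- ===== CLAIM (what is proved, stated in full; the proofs are below) =====
def Claim_equal_formatted_output : Prop := ∀ (date : String) (data : List (String × String)), Dom_formatted_output date data → Spec_formatted_output date data (formatted_output date data)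

-- ===== LEMMAS AND PROOFS =====
-- string bridge lemmas
lemma pvStrExt {a b : String} (h : a.toList = b.toList) : a = b := String.toList_inj.mp h

lemma pvJoin0_nil : PySem.Str.join "" [] = "" := by
  apply pvStrExt; simp [PySem.Str.toList_join, PySem.Chars.join_nil]

lemma pvJoin0_cons (x : String) (xs : List String) :
    PySem.Str.join "" (x :: xs) = x ++ PySem.Str.join "" xs := by
  cases xs with
  | nil => apply pvStrExt; simp [PySem.Str.toList_join, PySem.Chars.join_singleton, PySem.Chars.join_nil]
  | cons y r => apply pvStrExt; simp [PySem.Str.toList_join, PySem.Chars.join_cons_cons]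

lemma pvJoin0_append (a b : List String) :
    PySem.Str.join "" (a ++ b) = PySem.Str.join "" a ++ PySem.Str.join "" b := by
  induction a with
  | nil => simp [pvJoin0_nil]
  | cons x r ih => simp [pvJoin0_cons, ih, String.append_assoc]

lemma pvJoin_singleton (sep v : String) : PySem.Str.join sep [v] = v := by
  apply pvStrExt; simp [PySem.Str.toList_join, PySem.Chars.join_singleton]

lemma pvJoin_cons_cons (sep p q : String) (r : List String) :
    PySem.Str.join sep (p :: q :: r) = p ++ sep ++ PySem.Str.join sep (q :: r) := by
  apply pvStrExt; simp [PySem.Str.toList_join, PySem.Chars.join_cons_cons]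

def pvSep : String := "\n  · "

def pvSrun (vs : List String) : String := PySem.Str.join "" (vs.map (fun v => pvSep ++ v))

lemma pvSrun_nil : pvSrun [] = "" := by simp [pvSrun, pvJoin0_nil]

lemma pvSrun_cons (x : String) (l : List String) :
    pvSrun (x :: l) = (pvSep ++ x) ++ pvSrun l := by
  simp [pvSrun, pvJoin0_cons]

lemma pvJoin_sep_cons (v : String) (l : List String) :
    pvSep ++ PySem.Str.join pvSep (v :: l) = pvSrun (v :: l) := by
  induction l generalizing v with
  | nil => simp [pvJoin_singleton, pvSrun_cons, pvSrun_nil]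
  | cons w r ih =>
    rw [pvJoin_cons_cons, pvSrun_cons, ← ih]
    simp [String.append_assoc]

def pvCanon : List (String × String) → String
  | [] => ""
  | (k, v) :: t =>
    k ++ pvSrun (v :: (t.takeWhile (fun p => p.1 == k)).map (fun p => p.2)) ++ "\n" ++
      pvCanon (t.dropWhile (fun p => p.1 == k))
termination_by l => l.length
decreasing_by
  simp only [List.length_cons]
  exact Nat.lt_succ_of_le (List.length_dropWhile_le _ _)

-- Set.add fold lemmas
lemma pvFoldlAdd_absorb {α : Type} [BEq α] [LawfulBEq α] (l : List α) (acc : PySem.Set α)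
    (h : ∀ x ∈ l, x ∈ acc) : l.foldl PySem.Set.add acc = acc := by
  induction l with
  | nil => rfl
  | cons x r ih =>
    have hx : PySem.Set.add acc x = acc := by
      simp [PySem.Set.add, h x (by simp)]
    simp only [List.foldl_cons, hx]
    exact ih (fun y hy => h y (by simp [hy]))

lemma pvFoldlAdd_cons {α : Type} [BEq α] [LawfulBEq α] (l : List α) (k : α)
    (h : ∀ x ∈ l, x ≠ k) : ∀ acc : List α,
    l.foldl PySem.Set.add (k :: acc) = k :: l.foldl PySem.Set.add acc := by
  induction l with
  | nil => intro acc; rfl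
  | cons x r ih =>
    intro acc
    have hx : x ≠ k := h x (by simp)
    have hstep : PySem.Set.add (k :: acc) x = k :: PySem.Set.add acc x := by
      have hc : PySem.Set.contains (k :: acc) x = PySem.Set.contains acc x := by
        simp only [PySem.Set.contains, List.contains_cons]
        rw [beq_eq_false_iff_ne.mpr hx, Bool.false_or]
      simp only [PySem.Set.add, hc]
      by_cases hm : x ∈ acc
      · simp [hm]
      · simp [hm]
    simp only [List.foldl_cons, hstep]
    exact ih (fun y hy => h y (by simp [hy])) _

-- insertBy pairwise, general relation
lemma pvInsertBy_pairwise {α : Type} (R : α → α → Prop) (htrans : ∀ {a b c}, R a b → R b c → R a c)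
    (before : α → α → Bool)
    (h1 : ∀ a b, before a b = true → R a b) (h2 : ∀ a b, before a b = false → R b a)
    (x : α) (ys : List α) (h : ys.Pairwise R) :
    (PySem.List.insertBy before x ys).Pairwise R := by
  induction ys with
  | nil => simp [PySem.List.insertBy]
  | cons y ys ih =>
    rw [PySem.List.insertBy]
    by_cases hb : before x y = true
    · rw [if_pos hb]
      rcases List.pairwise_cons.mp h with ⟨hy, hys⟩
      exact List.pairwise_cons.mpr ⟨by
        intro z hz
        rcases List.mem_cons.mp hz with rfl | hz'
        · exact h1 _ _ hb
        · exact htrans (h1 _ _ hb) (hy z hz'), h⟩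
    · rw [if_neg hb]
      rcases List.pairwise_cons.mp h with ⟨hy, hys⟩
      refine List.pairwise_cons.mpr ⟨?_, ih hys⟩
      intro z hz
      rcases (PySem.List.mem_insertBy before x z ys).mp hz with rfl | hz'
      · exact h2 _ _ (Bool.not_eq_true _ ▸ eq_false_of_ne_true hb)
      · exact hy z hz'

lemma pvSorted2_pairwise_fst (data : List (String × String)) :
    (PySem.List.sorted2 data (fun n => n.1) (fun n => n.2)).Pairwise
      (fun a b => a.1 ≤ b.1) := by
  show (List.foldl (fun acc x => PySem.List.insertBy _ x acc) [] data).Pairwise _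
  generalize hB : (fun a b : String × String =>
      decide (a.1 < b.1) || (!decide (b.1 < a.1) && decide (a.2 < b.2))) = before
  suffices H : ∀ (l : List (String × String)) (acc : List (String × String)),
      acc.Pairwise (fun a b => a.1 ≤ b.1) →
      (List.foldl (fun acc x => PySem.List.insertBy before x acc) acc l).Pairwise
        (fun a b => a.1 ≤ b.1) by
    exact H data [] (by simp)
  intro l
  induction l with
  | nil => intro acc hacc; exact hacc
  | cons x r ih =>
    intro acc hacc
    refine ih _ (pvInsertBy_pairwise (fun a b => a.1 ≤ b.1) (fun hab hbc => le_trans hab hbc) before ?_ ?_ x acc hacc)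
    · intro a b hT
      subst hB
      simp only [Bool.or_eq_true, Bool.and_eq_true, decide_eq_true_eq, Bool.not_eq_eq_eq_not,
        Bool.not_true, decide_eq_false_iff_not] at hT
      rcases hT with h' | ⟨h', _⟩
      · exact le_of_lt h'
      · exact le_of_not_gt h'
    · intro a b hF
      subst hB
      simp only [Bool.or_eq_false_iff, Bool.and_eq_false_iff, decide_eq_false_iff_not] at hF
      exact le_of_not_gt hF.1

def pvSec (s : List (String × String)) (k : String) : String :=
  k ++ "\n" ++ ("  · " ++ PySem.Str.join "\n  · " ((s.filter (fun p => p.1 == k)).map (fun p => p.2))) ++ "\n"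

lemma pvSep_lit : ("\n" : String) ++ "  · " = pvSep := by decide

lemma pvSec_eq (s : List (String × String)) (k v : String) (run : List (String × String))
    (hf : s.filter (fun p => p.1 == k) = (k, v) :: run) :
    pvSec s k = k ++ pvSrun (v :: run.map (fun p => p.2)) ++ "\n" := by
  unfold pvSec
  rw [hf]
  have : ((k, v) :: run).map (fun p => p.2) = v :: run.map (fun p => p.2) := rfl
  rw [this]
  have hj : ("\n  · " : String) = pvSep := rfl
  rw [hj, ← pvJoin_sep_cons]
  simp only [String.append_assoc]
  rw [← String.append_assoc (s₁ := "\n") (s₂ := "  · "), pvSep_lit]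

lemma pvCanon_of_fold : ∀ (n : Nat) (s : List (String × String)), s.length ≤ n →
    s.Pairwise (fun a b => a.1 ≤ b.1) →
    ∀ base : String,
      (PySem.List.dedup (s.map (fun p => p.1))).foldl (fun b k => b ++ pvSec s k) base
        = base ++ pvCanon s := by
  intro n
  induction n with
  | zero =>
    intro s hlen _ base
    have hs : s = [] := List.eq_nil_of_length_eq_zero (Nat.le_zero.mp hlen)
    subst hs
    simp [PySem.List.dedup, PySem.Set.ofList, pvCanon]
  | succ n ih =>
    intro s hlen hpair base
    match s, hlen, hpair with
    | [], _, _ => simp [PySem.List.dedup, PySem.Set.ofList, pvCanon]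
    | (k, v) :: t, hlen, hpair =>
      rcases List.pairwise_cons.mp hpair with ⟨hhead, hpt⟩
      have hhead' : ∀ b ∈ t, k ≤ b.1 := fun b hb => hhead b hb
      have hsplit : t.takeWhile (fun q => q.1 == k) ++ t.dropWhile (fun q => q.1 == k) = t :=
        List.takeWhile_append_dropWhile
      have hrunk : ∀ q ∈ t.takeWhile (fun q => q.1 == k), q.1 = k := by
        intro q hq
        have := List.mem_takeWhile_imp hq
        simpa using this
      have hrsub : (t.dropWhile (fun q => q.1 == k)).Sublist t :=
        (List.dropWhile_suffix _).sublist
      have hrest : ∀ q ∈ t.dropWhile (fun q => q.1 == k), q.1 ≠ k := by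
        intro q hq
        have hne : t.dropWhile (fun q => q.1 == k) ≠ [] := List.ne_nil_of_mem hq
        have h0 := List.head_dropWhile_not (fun q : String × String => q.1 == k) hne
        have hpr : (t.dropWhile (fun q => q.1 == k)).Pairwise (fun a b => a.1 ≤ b.1) :=
          hpt.sublist hrsub
        have hcons := List.cons_head_tail hne
        have hpr' : ((t.dropWhile (fun q => q.1 == k)).head hne ::
            (t.dropWhile (fun q => q.1 == k)).tail).Pairwise (fun a b => a.1 ≤ b.1) := by
          rw [hcons]; exact hpr
        rcases List.pairwise_cons.mp hpr' with ⟨hrel, _⟩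
        have hq' : q = (t.dropWhile (fun q => q.1 == k)).head hne ∨
            q ∈ (t.dropWhile (fun q => q.1 == k)).tail := by
          rw [← hcons] at hq; exact List.mem_cons.mp hq
        have hle : ((t.dropWhile (fun q => q.1 == k)).head hne).1 ≤ q.1 := by
          rcases hq' with rfl | hq2
          · exact le_refl _
          · exact hrel q hq2
        have hkh : k ≤ ((t.dropWhile (fun q => q.1 == k)).head hne).1 :=
          hhead' _ (hrsub.mem (List.head_mem hne))
        have hkne : ((t.dropWhile (fun q => q.1 == k)).head hne).1 ≠ k := by
          simpa using h0
        have hlt : k < ((t.dropWhile (fun q => q.1 == k)).head hne).1 :=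
          lt_of_le_of_ne hkh (Ne.symm hkne)
        intro hcontr
        rw [hcontr] at hle
        exact absurd (lt_of_lt_of_le hlt hle) (lt_irrefl k)
      -- dedup of the keys
      have hadd0 : PySem.Set.add ([] : List String) k = [k] := rfl
      have hded : PySem.List.dedup (((k, v) :: t).map (fun p => p.1))
          = k :: PySem.List.dedup ((t.dropWhile (fun q => q.1 == k)).map (fun p => p.1)) := by
        show List.foldl PySem.Set.add PySem.Set.empty _ = _
        rw [List.map_cons, List.foldl_cons]
        have hmt : t.map (fun p => p.1)
            = (t.takeWhile (fun q => q.1 == k)).map (fun p => p.1)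
              ++ (t.dropWhile (fun q => q.1 == k)).map (fun p => p.1) := by
          rw [← List.map_append, hsplit]
        rw [hmt, List.foldl_append]
        have habs : List.foldl PySem.Set.add (PySem.Set.add PySem.Set.empty k)
            ((t.takeWhile (fun q => q.1 == k)).map (fun p => p.1))
            = PySem.Set.add PySem.Set.empty k := by
          apply pvFoldlAdd_absorb
          intro x hx
          obtain ⟨q, hq, rfl⟩ := List.mem_map.mp hx
          have : q.1 = k := hrunk q hq
          rw [this]
          show k ∈ PySem.Set.add PySem.Set.empty k
          rw [show PySem.Set.add PySem.Set.empty k = [k] from rfl]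
          simp
        rw [habs]
        rw [show PySem.Set.add PySem.Set.empty k = [k] from rfl]
        have := pvFoldlAdd_cons ((t.dropWhile (fun q => q.1 == k)).map (fun p => p.1)) k
          (by
            intro x hx
            obtain ⟨q, hq, rfl⟩ := List.mem_map.mp hx
            exact hrest q hq) ([] : List String)
        rw [this]
        rfl
      -- filter at key k
      have hfil : ((k, v) :: t).filter (fun p => p.1 == k)
          = (k, v) :: t.takeWhile (fun q => q.1 == k) := by
        rw [List.filter_cons_of_pos (by simp)]
        congr 1
        rw [← hsplit, List.filter_append]
        rw [List.filter_eq_self.mpr (fun a ha => by simp [hrunk a ha])]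
        rw [List.filter_eq_nil_iff.mpr (fun a ha => by simp [hrest a ha])]
        simp
      -- sections over the remaining keys only look at rest
      have hcong : ∀ (b : String), ∀ k' ∈ PySem.List.dedup
          ((t.dropWhile (fun q => q.1 == k)).map (fun p => p.1)),
          b ++ pvSec ((k, v) :: t) k' = b ++ pvSec (t.dropWhile (fun q => q.1 == k)) k' := by
        intro b k' hk'
        have hk'mem : k' ∈ (t.dropWhile (fun q => q.1 == k)).map (fun p => p.1) :=
          (PySem.List.mem_dedup _ _).mp hk'
        obtain ⟨q, hq, rfl⟩ := List.mem_map.mp hk'mem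
        have hne : q.1 ≠ k := hrest q hq
        have hfeq : ((k, v) :: t).filter (fun p => p.1 == q.1)
            = (t.dropWhile (fun q' => q'.1 == k)).filter (fun p => p.1 == q.1) := by
          rw [List.filter_cons_of_neg (by simp; exact fun h => hne h.symm)]
          rw [← hsplit, List.filter_append]
          rw [List.filter_eq_nil_iff.mpr (fun a ha => by
            have : a.1 = k := hrunk a ha
            simp [this]; exact fun h => hne h.symm)]
          simp
        unfold pvSec
        rw [hfeq]
      -- assemble
      rw [hded, List.foldl_cons]
      rw [PySem.List.foldl_congr_mem _ _ (fun b k' => b ++ pvSec (t.dropWhile (fun q => q.1 == k)) k') _ hcong]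
      have hlen' : (t.dropWhile (fun q => q.1 == k)).length ≤ n :=
        le_trans (List.length_dropWhile_le _ _) (Nat.lt_succ_iff.mp (Nat.lt_of_lt_of_le (Nat.lt_succ_of_le (le_refl _)) hlen))
      rw [ih _ hlen' (hpt.sublist hrsub) (base ++ pvSec ((k, v) :: t) k)]
      rw [pvSec_eq _ k v _ hfil]
      rw [pvCanon]
      simp [String.append_assoc]

lemma pvBfold_run : ∀ (t : List (String × String)) (parts : List String) (k : String),
    PySem.Str.join ""
      ((fun st : List String × Option String =>
          if st.2.isSome then st.1 ++ ["\n"] else st.1)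
        (t.foldl
          (fun (st : List String × Option String) p =>
            if some p.1 ≠ st.2 then
              (((if st.2.isSome then st.1 ++ ["\n"] else st.1) ++ [p.1]) ++ ["\n  · " ++ p.2], some p.1)
            else (st.1 ++ ["\n  · " ++ p.2], st.2))
          (parts, some k)))
    = PySem.Str.join "" parts ++ pvSrun ((t.takeWhile (fun p => p.1 == k)).map (fun p => p.2))
      ++ "\n" ++ pvCanon (t.dropWhile (fun p => p.1 == k)) := by
  intro t
  induction t with
  | nil =>
    intro parts k
    simp only [List.foldl_nil, List.takeWhile_nil, List.dropWhile_nil, Option.isSome_some,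
      if_pos, List.map_nil]
    rw [pvJoin0_append, pvJoin0_cons, pvJoin0_nil, pvSrun_nil]
    show PySem.Str.join "" parts ++ ("\n" ++ "") = _
    rw [pvCanon]
    simp [String.append_assoc]
  | cons p t' ihp =>
    intro parts k
    by_cases hk : p.1 = k
    · rw [List.foldl_cons]
      have hcond : ¬ (some p.1 ≠ (some k : Option String)) := by simp [hk]
      rw [if_neg hcond]
      rw [ihp]
      rw [List.takeWhile_cons_of_pos (by simp [hk]), List.dropWhile_cons_of_pos (by simp [hk])]
      rw [List.map_cons, pvSrun_cons, pvJoin0_append, pvJoin0_cons, pvJoin0_nil]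
      simp [String.append_assoc, pvSep]
    · rw [List.foldl_cons]
      have hcond : (some p.1 ≠ (some k : Option String)) := by simp [hk]
      rw [if_pos hcond]
      simp only [Option.isSome_some, if_pos]
      rw [ihp]
      rw [List.takeWhile_cons_of_neg (by simp [hk]), List.dropWhile_cons_of_neg (by simp [hk])]
      rw [List.map_nil, pvSrun_nil, pvCanon]
      rw [pvJoin0_append, pvJoin0_append, pvJoin0_append, pvJoin0_cons, pvJoin0_cons,
        pvJoin0_cons, pvJoin0_nil, pvSrun_cons]
      simp [String.append_assoc, pvSep]

lemma pvB_eq (base : String) (s : List (String × String)) :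
    PySem.Str.join ""
      ((fun st : List String × Option String =>
          if st.2.isSome then st.1 ++ ["\n"] else st.1)
        (s.foldl
          (fun (st : List String × Option String) p =>
            if some p.1 ≠ st.2 then
              (((if st.2.isSome then st.1 ++ ["\n"] else st.1) ++ [p.1]) ++ ["\n  · " ++ p.2], some p.1)
            else (st.1 ++ ["\n  · " ++ p.2], st.2))
          ([base], none)))
    = base ++ pvCanon s := by
  cases s with
  | nil =>
    rw [List.foldl_nil]
    show PySem.Str.join "" [base] = base ++ pvCanon []
    rw [pvCanon, pvJoin0_cons, pvJoin0_nil]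
  | cons p t =>
    rw [List.foldl_cons]
    have hcond : (some p.1 ≠ (none : Option String)) := by simp
    rw [if_pos hcond]
    show PySem.Str.join "" ((fun st : List String × Option String =>
          if st.2.isSome then st.1 ++ ["\n"] else st.1)
        (t.foldl _ (([base] ++ [p.1]) ++ ["\n  · " ++ p.2], some p.1))) = _
    rw [pvBfold_run]
    rw [pvJoin0_append, pvJoin0_append, pvJoin0_cons, pvJoin0_cons, pvJoin0_cons, pvJoin0_nil]
    have : pvCanon (p :: t) = p.1 ++ pvSrun (p.2 :: (t.takeWhile (fun q => q.1 == p.1)).map (fun q => q.2)) ++ "\n" ++ pvCanon (t.dropWhile (fun q => q.1 == p.1)) := by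
      rw [pvCanon]
    rw [this, pvSrun_cons]
    simp [String.append_assoc, pvSep]


-- ===== VERDICT (by name: the statement is the Claim_ definition above) =====
theorem formatted_output_spec : Claim_equal_formatted_output := by
  intro date data _
  unfold Spec_formatted_output
  have hpair := pvSorted2_pairwise_fst data
  have hB : formatted_output_alt date data
      = ("News at <b>" ++ date ++ "(" ++ PySem.Int.toStr (PySem.List.len data) ++ ")</b>:\n")
        ++ pvCanon (PySem.List.sorted2 data (fun n => n.1) (fun n => n.2)) := by
    simp only [formatted_output_alt]
    exact pvB_eq _ _
  have hbody : (fun (b key : String) => b ++ key ++ "\n" ++ ("  · " ++ PySem.Str.join "\n  · "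
        (((PySem.List.sorted2 data (fun n => n.1) (fun n => n.2)).foldl
          (fun d news => d.modify news.1 [] (fun l => l ++ [news.2])) PySem.Dict.empty).getD key [])) ++ "\n")
      = fun (b key : String) => b ++ pvSec (PySem.List.sorted2 data (fun n => n.1) (fun n => n.2)) key := by
    funext b key
    rw [PySem.Dict.getD_foldl_modify_append, PySem.Dict.getD_empty]
    unfold pvSec
    simp [String.append_assoc]
  have hA : formatted_output date data
      = ("News at <b>" ++ date ++ "(" ++ PySem.Int.toStr (PySem.List.len data) ++ ")</b>:\n")
        ++ pvCanon (PySem.List.sorted2 data (fun n => n.1) (fun n => n.2)) := by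
    simp only [formatted_output]
    rw [PySem.Dict.keys_foldl_modify_key, PySem.Dict.keys_empty]
    rw [show ∀ l : List String, PySem.Set.update ([] : PySem.Set String) l = PySem.List.dedup l
        from fun l => rfl]
    rw [hbody]
    exact pvCanon_of_fold _ _ (le_refl _) hpair _
  rw [hA, hB]
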